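-- pv_equiv track=rewrite | github.com/btrspg/freddie | py/polyA_detection.py | find_longest_polyA
-- ===== SOURCE A (Python) =====
-- def find_polyA_substrs(seq, match_score=1, mismatch_score=-1):
-- 	scores = [ 0 ]
-- 	starts = [ -1 ]	# keeps one index before start
-- 	i = 0
-- 	for ch in seq:
-- 		to_be_added = match_score if (ch == 'T' or ch == 't') else mismatch_score
-- 		new_score = scores[-1] + to_be_added
-- 		new_start = starts[-1]
--
-- 		if new_score <= 0:
-- 			new_score = 0
-- 			new_start = i
--
-- 		scores.append(new_score)
-- 		starts.append(new_start)
--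
-- 		i += 1
--
-- 	return scores, starts
--
-- def find_longest_polyA(seq):
-- 	scores, starts = find_polyA_substrs(seq, 1, -1)
--
-- 	max_ind = 0
-- 	for i in range(len(scores)):
-- 		if (scores[i] > scores[max_ind]) or (scores[i] == scores[max_ind] and starts[i] < starts[max_ind]):
-- 			max_ind = i
--
-- 	# [start, end)
-- 	start = starts[max_ind] + 1
-- 	end = max_ind
-- 	score = scores[max_ind]
--
-- 	return start, end, score
-- ===== SOURCE B (Python) =====
-- def find_longest_polyA(seq):
--     best_score, best_start, best_end = 0, -1, 0
--     cur_score, cur_start = 0, -1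
--     for i, ch in enumerate(seq):
--         cur_score += 1 if (ch == 'T' or ch == 't') else -1
--         if cur_score <= 0:
--             cur_score = 0
--             cur_start = i
--         if cur_score > best_score or (cur_score == best_score and cur_start < best_start):
--             best_score, best_start, best_end = cur_score, cur_start, i + 1
--     return best_start + 1, best_end, best_score
-- ===== Notes on version B (the rewrite author's own statement) =====
-- stated objective: simpler
-- what changed: B replaces A's three-phase design (build full scores[] and starts[] arrays in one loop, then a second argmax loop over all indices by list indexing) with a single Kadane-style pass keeping only the running (cur_score, cur_start) and the best (score, start, end) triple, with no intermediate arrays.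
import Mathlib
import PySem

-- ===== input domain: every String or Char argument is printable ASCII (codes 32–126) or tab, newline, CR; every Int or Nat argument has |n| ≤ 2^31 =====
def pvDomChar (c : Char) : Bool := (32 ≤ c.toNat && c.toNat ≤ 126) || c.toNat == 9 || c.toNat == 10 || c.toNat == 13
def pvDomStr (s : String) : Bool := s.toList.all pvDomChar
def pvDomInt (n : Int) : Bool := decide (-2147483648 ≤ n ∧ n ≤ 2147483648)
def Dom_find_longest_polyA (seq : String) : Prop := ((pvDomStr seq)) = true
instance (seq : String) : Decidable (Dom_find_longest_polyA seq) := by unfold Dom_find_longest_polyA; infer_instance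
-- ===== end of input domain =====

-- B fuses A's three passes (build scores/starts arrays, then argmax scan) into one
-- running-best pass with no intermediate arrays; objective: simpler (same O(n) time, O(1) space).

-- ===== PORT A =====
-- scores[-1] / starts[-1]: the lists are nonempty at every read (they start as [0] / [-1]
-- and only grow), so Python never raises here; .getD 0 merely discharges the Option.
def find_polyA_substrs_port (seq : String) (match_score mismatch_score : Int) :
    List Int × List Int :=
  let st := seq.toList.foldl
    (fun (st : List Int × List Int × Int) ch =>
      let scores := st.1
      let starts := st.2.1
      let i := st.2.2
      let to_be_added := if ch = 'T' ∨ ch = 't' then match_score else mismatch_score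
      let new_score := (PySem.List.pyGet? scores (-1)).getD 0 + to_be_added
      let new_start := (PySem.List.pyGet? starts (-1)).getD 0
      let new_score' := if new_score ≤ 0 then 0 else new_score
      let new_start' := if new_score ≤ 0 then i else new_start
      (scores ++ [new_score'], starts ++ [new_start'], i + 1))
    ([0], [-1], 0)
  (st.1, st.2.1)

def find_longest_polyA (seq : String) : Int × Int × Int :=
  let p := find_polyA_substrs_port seq 1 (-1)
  let scores := p.1
  let starts := p.2
  -- indices produced by range(len(scores)) are in range, so .getD 0 discharges the Option
  let max_ind := (PySem.List.pyRange 0 (scores.length : Int) 1).foldl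
    (fun (max_ind : Int) i =>
      if (PySem.List.pyGet? scores i).getD 0 > (PySem.List.pyGet? scores max_ind).getD 0 ∨
         ((PySem.List.pyGet? scores i).getD 0 = (PySem.List.pyGet? scores max_ind).getD 0 ∧
          (PySem.List.pyGet? starts i).getD 0 < (PySem.List.pyGet? starts max_ind).getD 0)
      then i else max_ind)
    0
  ((PySem.List.pyGet? starts max_ind).getD 0 + 1, max_ind,
   (PySem.List.pyGet? scores max_ind).getD 0)

-- ===== PORT B =====
-- state: ((best_score, best_start, best_end), cur_score, cur_start, i)
def find_longest_polyA_alt (seq : String) : Int × Int × Int :=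
  let st := seq.toList.foldl
    (fun (st : (Int × Int × Int) × Int × Int × Int) ch =>
      let best := st.1
      let cur_score := st.2.1
      let cur_start := st.2.2.1
      let i := st.2.2.2
      let cs := cur_score + (if ch = 'T' ∨ ch = 't' then 1 else -1)
      let cur_score' := if cs ≤ 0 then 0 else cs
      let cur_start' := if cs ≤ 0 then i else cur_start
      let best' := if cur_score' > best.1 ∨ (cur_score' = best.1 ∧ cur_start' < best.2.1)
                   then (cur_score', cur_start', i + 1) else best
      (best', cur_score', cur_start', i + 1))
    ((0, -1, 0), 0, -1, 0)
  (st.1.2.1 + 1, st.1.2.2, st.1.1)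

-- ===== PRECONDITION & SPEC =====
def Spec_find_longest_polyA (seq : String) (out : Int × Int × Int) : Prop := out = find_longest_polyA_alt seq
instance (seq : String) (out : Int × Int × Int) : Decidable (Spec_find_longest_polyA seq out) := by unfold Spec_find_longest_polyA; infer_instance

-- ===== CLAIM (what is proved, stated in full; the proofs are below) =====
def Claim_equal_find_longest_polyA : Prop := ∀ (seq : String), Dom_find_longest_polyA seq → Spec_find_longest_polyA seq (find_longest_polyA seq)

-- ===== LEMMAS AND PROOFS =====

/-- One Kadane-style step: new (score, start) pair from the previous one at position `i`. -/
def pvStep (i : Int) (cur : Int × Int) (ch : Char) : Int × Int :=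
  let ns := cur.1 + (if ch = 'T' ∨ ch = 't' then 1 else -1)
  if ns ≤ 0 then (0, i) else (ns, cur.2)

/-- The stream of (score, start) pairs produced from state `cur` at position `i`. -/
def pvScan (cur : Int × Int) (i : Int) : List Char → List (Int × Int)
  | [] => []
  | c :: cs => pvStep i cur c :: pvScan (pvStep i cur c) (i + 1) cs

/-- Best-so-far selection over a pair stream whose first element has index `i`. -/
def pvSel (best : Int × Int × Int) (i : Int) : List (Int × Int) → Int × Int × Int
  | [] => best
  | p :: rest =>
      pvSel (if p.1 > best.1 ∨ (p.1 = best.1 ∧ p.2 < best.2.1) then (p.1, p.2, i) else best)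
        (i + 1) rest

lemma pvGet_last (xs : List Int) (a : Int) :
    PySem.List.pyGet? (xs ++ [a]) (-1) = some a := by
  simp [PySem.List.pyGet?, PySem.List.pyIdx?]

/-- A's first loop appends exactly the pvScan stream. -/
lemma pvA_fold (l : List Char) : ∀ (pre1 pre2 : List Int) (cur : Int × Int) (i : Int),
    l.foldl
      (fun (st : List Int × List Int × Int) ch =>
        let scores := st.1
        let starts := st.2.1
        let i := st.2.2
        let to_be_added := if ch = 'T' ∨ ch = 't' then (1 : Int) else (-1)
        let new_score := (PySem.List.pyGet? scores (-1)).getD 0 + to_be_added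
        let new_start := (PySem.List.pyGet? starts (-1)).getD 0
        let new_score' := if new_score ≤ 0 then 0 else new_score
        let new_start' := if new_score ≤ 0 then i else new_start
        (scores ++ [new_score'], starts ++ [new_start'], i + 1))
      (pre1 ++ [cur.1], pre2 ++ [cur.2], i)
    = (pre1 ++ [cur.1] ++ (pvScan cur i l).map Prod.fst,
       pre2 ++ [cur.2] ++ (pvScan cur i l).map Prod.snd,
       i + l.length) := by
  induction l with
  | nil => intro pre1 pre2 cur i; simp [pvScan]
  | cons c cs ih =>
      intro pre1 pre2 cur i
      simp only [List.foldl_cons, pvGet_last, Option.getD_some]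
      by_cases h : cur.1 + (if c = 'T' ∨ c = 't' then (1 : Int) else -1) ≤ 0
      · simpa [pvScan, pvStep, h, List.append_assoc, add_comm, add_left_comm, add_assoc] using
          ih (pre1 ++ [cur.1]) (pre2 ++ [cur.2]) (0, i) (i + 1)
      · simpa [pvScan, pvStep, h, List.append_assoc, add_comm, add_left_comm, add_assoc] using
          ih (pre1 ++ [cur.1]) (pre2 ++ [cur.2])
            (cur.1 + (if c = 'T' ∨ c = 't' then (1 : Int) else -1), cur.2) (i + 1)

/-- A's argmax loop over indices computes pvSel of the remaining pair stream. -/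
lemma pvA_sel (P : List (Int × Int)) : ∀ (r t : List (Int × Int)), P = t ++ r → ∀ (m : Int),
    (fun mi => ((PySem.List.pyGet? (P.map Prod.fst) mi).getD 0,
                (PySem.List.pyGet? (P.map Prod.snd) mi).getD 0, mi))
      ((PySem.List.pyRange (t.length : Int) (P.length : Int) 1).foldl
        (fun (max_ind : Int) i =>
          if (PySem.List.pyGet? (P.map Prod.fst) i).getD 0 >
               (PySem.List.pyGet? (P.map Prod.fst) max_ind).getD 0 ∨
             ((PySem.List.pyGet? (P.map Prod.fst) i).getD 0 =
                (PySem.List.pyGet? (P.map Prod.fst) max_ind).getD 0 ∧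
              (PySem.List.pyGet? (P.map Prod.snd) i).getD 0 <
                (PySem.List.pyGet? (P.map Prod.snd) max_ind).getD 0)
          then i else max_ind) m)
    = pvSel ((PySem.List.pyGet? (P.map Prod.fst) m).getD 0,
             (PySem.List.pyGet? (P.map Prod.snd) m).getD 0, m) (t.length : Int) r := by
  intro r
  induction r with
  | nil =>
      intro t hP m
      have hlen : (t.length : Int) = (P.length : Int) := by simp [hP]
      rw [hlen]
      simp [PySem.List.pyRange, pvSel]
  | cons p r' ih =>
      intro t hP m
      have hlt : (t.length : Int) < (P.length : Int) := by
        subst hP; simp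
      rw [PySem.List.pyRange_one_cons hlt]
      have hget1 : PySem.List.pyGet? (P.map Prod.fst) ((t.length : Nat) : Int) = some p.1 := by
        subst hP
        simp
      have hget2 : PySem.List.pyGet? (P.map Prod.snd) ((t.length : Nat) : Int) = some p.2 := by
        subst hP
        simp
      have hP' : P = (t ++ [p]) ++ r' := by simp [hP]
      have hlen' : ((t ++ [p]).length : Int) = (t.length : Int) + 1 := by simp
      simp only [List.foldl_cons]
      by_cases h : p.1 > (PySem.List.pyGet? (P.map Prod.fst) m).getD 0 ∨
          (p.1 = (PySem.List.pyGet? (P.map Prod.fst) m).getD 0 ∧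
           p.2 < (PySem.List.pyGet? (P.map Prod.snd) m).getD 0)
      · have := ih (t ++ [p]) hP' ((t.length : Nat) : Int)
        rw [hlen'] at this
        simp only [hget1, hget2, Option.getD_some] at this ⊢
        rw [if_pos h, this, pvSel, if_pos h]
      · have := ih (t ++ [p]) hP' m
        rw [hlen'] at this
        simp only [hget1, hget2, Option.getD_some] at this ⊢
        rw [if_neg h, this, pvSel, if_neg h]

/-- B's fused loop computes pvSel over the pvScan stream. -/
lemma pvB_fold (l : List Char) : ∀ (best : Int × Int × Int) (cur : Int × Int) (i : Int),
    (l.foldl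
      (fun (st : (Int × Int × Int) × Int × Int × Int) ch =>
        let best := st.1
        let cur_score := st.2.1
        let cur_start := st.2.2.1
        let i := st.2.2.2
        let cs := cur_score + (if ch = 'T' ∨ ch = 't' then (1 : Int) else -1)
        let cur_score' := if cs ≤ 0 then 0 else cs
        let cur_start' := if cs ≤ 0 then i else cur_start
        let best' := if cur_score' > best.1 ∨ (cur_score' = best.1 ∧ cur_start' < best.2.1)
                     then (cur_score', cur_start', i + 1) else best
        (best', cur_score', cur_start', i + 1))
      (best, cur.1, cur.2, i)).1
    = pvSel best (i + 1) (pvScan cur i l) := by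
  induction l with
  | nil => intro best cur i; simp [pvScan, pvSel]
  | cons c cs ih =>
      intro best cur i
      simp only [List.foldl_cons, pvScan, pvSel]
      by_cases h : cur.1 + (if c = 'T' ∨ c = 't' then (1 : Int) else -1) ≤ 0
      · simpa [pvStep, h] using
          ih (if (0:Int) > best.1 ∨ ((0:Int) = best.1 ∧ i < best.2.1)
              then ((0:Int), i, i + 1) else best) (0, i) (i + 1)
      · simpa [pvStep, h] using
          ih (if cur.1 + (if c = 'T' ∨ c = 't' then (1 : Int) else -1) > best.1 ∨
                 (cur.1 + (if c = 'T' ∨ c = 't' then (1 : Int) else -1) = best.1 ∧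
                  cur.2 < best.2.1)
              then (cur.1 + (if c = 'T' ∨ c = 't' then (1 : Int) else -1), cur.2, i + 1)
              else best)
            (cur.1 + (if c = 'T' ∨ c = 't' then (1 : Int) else -1), cur.2) (i + 1)

-- ===== VERDICT (by name: the statement is the Claim_ definition above) =====
theorem find_longest_polyA_spec : Claim_equal_find_longest_polyA := by
  intro seq _
  unfold Spec_find_longest_polyA find_longest_polyA find_longest_polyA_alt find_polyA_substrs_port
  have hA := pvA_fold seq.toList [] [] (0, -1) 0
  simp only [List.nil_append] at hA
  rw [hA]
  set S := pvScan (0, -1) 0 seq.toList with hS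
  have hmap1 : (0 : Int) :: S.map Prod.fst = (((0 : Int), (-1 : Int)) :: S).map Prod.fst := by simp
  have hmap2 : (-1 : Int) :: S.map Prod.snd = (((0 : Int), (-1 : Int)) :: S).map Prod.snd := by simp
  have hsel := pvA_sel ((((0 : Int), (-1 : Int)) :: S)) (((0 : Int), (-1 : Int)) :: S) [] rfl 0
  have hB := pvB_fold seq.toList (0, -1, 0) (0, -1) 0
  simp only [List.length_nil, Nat.cast_zero] at hsel
  have hget0a : (PySem.List.pyGet? ((((0:Int),(-1:Int)) :: S).map Prod.fst) 0).getD 0 = 0 := by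
    simp [PySem.List.pyGet?, PySem.List.pyIdx?]
  have hget0b : (PySem.List.pyGet? ((((0:Int),(-1:Int)) :: S).map Prod.snd) 0).getD 0 = -1 := by
    simp [PySem.List.pyGet?, PySem.List.pyIdx?]
  rw [hget0a, hget0b] at hsel
  have hsel0 : pvSel ((0:Int), (-1:Int), (0:Int)) 0 ((((0:Int),(-1:Int))) :: S)
      = pvSel ((0:Int), (-1:Int), (0:Int)) 1 S := by
    simp [pvSel]
  simp only [List.singleton_append] at *
  simp only [hmap1, hmap2, List.length_cons, List.length_map]
  rw [hB]
  have hfin := hsel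
  rw [hsel0] at hfin
  -- hfin : (get fst m, get snd m, m) = pvSel (0,-1,0) 1 S  where m is A's fold result
  have h1 := congrArg (fun x : Int × Int × Int => x.1) hfin
  have h2 := congrArg (fun x : Int × Int × Int => x.2.1) hfin
  have h3 := congrArg (fun x : Int × Int × Int => x.2.2) hfin
  simp only at h1 h2 h3
  simp only [zero_add] at *
  simp only [List.length_cons] at h1 h2 h3
  rw [h1, h2, h3]
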